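-- pv_equiv track=rewrite | github.com/istio/tools | perf/benchmark/runner/fortio.py | converDataToList
-- ===== SOURCE A (Python) =====
-- def converDataToList(txt):
--     idx = 0
--     lines = []
--
--     marker = '<option value="'
--     # marker = 'a href="' # This used to be the marker in older version of
--     # fortio
--     while True:
--         idx = txt.find(marker, idx)
--         if idx == -1:
--             break
--         startRef = idx + len(marker)
--         end = txt.find('"', startRef)
--         lines.append(txt[startRef:end])
--         idx += 1
--
--     return lines
-- ===== SOURCE B (Python) =====
-- def converDataToList(txt):
--     marker = '<option value="'
--     out = []
--     for part in txt.split(marker)[1:]: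
--         q = part.find('"')
--         out.append(part[:q] if q != -1 else part)
--     return out
-- ===== Notes on version B (the rewrite author's own statement) =====
-- stated objective: alternative
-- what changed: B splits the text once on the marker and maps each segment to its prefix before the closing quote, instead of A's while-loop repeatedly calling find() with a moving index over the whole text.
-- intended difference: On inputs where some marker occurrence has no closing quote before the next marker (or end of text), A returns garbage there -- the segment plus part of the next marker's own text, or the segment with its last character dropped (find()==-1 sliced as [:-1]) -- while B returns the raw unterminated segment, which is the intended value. — e.g. on converDataToList("<option value=\"abc"): A returns ["ab"], B returns ["abc"]
import Mathlib
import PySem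

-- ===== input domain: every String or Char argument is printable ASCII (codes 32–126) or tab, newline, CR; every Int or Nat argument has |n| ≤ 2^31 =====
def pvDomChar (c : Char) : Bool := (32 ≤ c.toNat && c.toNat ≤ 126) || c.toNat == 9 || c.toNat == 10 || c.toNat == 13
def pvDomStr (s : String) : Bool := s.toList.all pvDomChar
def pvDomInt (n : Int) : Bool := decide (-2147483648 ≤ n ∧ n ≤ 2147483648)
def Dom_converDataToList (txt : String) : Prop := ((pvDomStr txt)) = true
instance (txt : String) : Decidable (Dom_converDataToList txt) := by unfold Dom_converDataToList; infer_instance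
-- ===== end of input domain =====

-- B splits the text once on the marker and maps each segment to its prefix before the closing
-- quote, instead of A's index-chasing find() loop; on unterminated values (no closing quote
-- before the next marker or end of text) B returns the raw segment where A returns garbage
-- (see D_ below).

-- ===== PORT A =====
-- the marker '<option value="'
def pvMarker : List Char := ['<','o','p','t','i','o','n',' ','v','a','l','u','e','=','"']

theorem pvMarker_length : pvMarker.length = 15 := rfl

-- bounds the loop of A needs for termination (cited in pvLoopA's decreasing_by)
theorem pvFound_bounds (txt : List Char) (idx : Nat) (h : idx ≤ txt.length)
    (hf : PySem.Chars.findFrom txt pvMarker (idx : Int) ≠ -1) :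
    idx ≤ (PySem.Chars.findFrom txt pvMarker (idx : Int)).toNat ∧
      (PySem.Chars.findFrom txt pvMarker (idx : Int)).toNat + 15 ≤ txt.length := by
  obtain ⟨h1, h2, -⟩ := PySem.Chars.findFrom_natCast_spec txt pvMarker idx h hf
  have h3 := h2.length_le
  simp only [List.length_drop, pvMarker_length] at h3
  omega

-- the Python while-loop of A: idx is the running search position in txt
def pvLoopA (txt : List Char) (idx : Nat) (h : idx ≤ txt.length) : List (List Char) :=
  if hf : PySem.Chars.findFrom txt pvMarker (idx : Int) = -1 then []
  else
    PySem.List.slice txt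
        (some (((PySem.Chars.findFrom txt pvMarker (idx : Int)).toNat + pvMarker.length : Nat) : Int))
        (some (PySem.Chars.findFrom txt ['"']
          (((PySem.Chars.findFrom txt pvMarker (idx : Int)).toNat + pvMarker.length : Nat) : Int)))
      :: pvLoopA txt ((PySem.Chars.findFrom txt pvMarker (idx : Int)).toNat + 1)
          (by have := pvFound_bounds txt idx h hf; omega)
termination_by txt.length - idx
decreasing_by
  have := pvFound_bounds txt idx h hf
  omega

def converDataToList (txt : String) : List String :=
  (pvLoopA txt.toList 0 (Nat.zero_le _)).map (fun l => String.ofList l)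

-- ===== PORT B =====
-- B's loop body: the value of one segment (prefix before its closing quote, or the whole segment)
def pvValB (p : List Char) : List Char :=
  if PySem.Chars.find p ['"'] ≠ -1 then
    PySem.List.slice p none (some (PySem.Chars.find p ['"']))
  else p

def converDataToList_alt (txt : String) : List String :=
  ((PySem.Chars.splitOn txt.toList pvMarker).tail).map (fun p => String.ofList (pvValB p))

-- ===== PRECONDITION & SPEC =====
-- On inputs where some marker occurrence has no closing quote before the next marker (or end of
-- text), A returns garbage there — the segment plus part of the next marker's own text, or the
-- segment with its last character dropped (find()==-1 sliced as [:-1]) — while B returns the raw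
-- unterminated segment, which is the intended value.
def D_converDataToList (txt : String) : Prop :=
  ∃ t ∈ txt.toList.tails, pvMarker <+: t ∧
    (pvMarker.dropLast <:+ (t.drop 15).takeWhile (· ≠ '"') ∨
      ((t.drop 15).takeWhile (· ≠ '"') = t.drop 15 ∧ t.drop 15 ≠ []))
instance (txt : String) : Decidable (D_converDataToList txt) := by unfold D_converDataToList; infer_instance

def Spec_converDataToList (txt : String) (out : List String) : Prop :=
  ¬ D_converDataToList txt → out = converDataToList_alt txt
instance (txt : String) (out : List String) : Decidable (Spec_converDataToList txt out) := by unfold Spec_converDataToList; infer_instance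

def pvDiffWitness_converDataToList : String := "<option value=\"abc"
def pvDiffWitnessOut_converDataToList : (List String) × (List String) := (["ab"], ["abc"])

-- ===== CLAIM (what is proved, stated in full; the proofs are below) =====
def Claim_unchanged_converDataToList : Prop := ∀ (txt : String), Dom_converDataToList txt → Spec_converDataToList txt (converDataToList txt)
def Claim_changed_converDataToList : Prop := Dom_converDataToList (pvDiffWitness_converDataToList) ∧ D_converDataToList (pvDiffWitness_converDataToList) ∧ converDataToList (pvDiffWitness_converDataToList) = pvDiffWitnessOut_converDataToList.1 ∧ converDataToList_alt (pvDiffWitness_converDataToList) = pvDiffWitnessOut_converDataToList.2 ∧ pvDiffWitnessOut_converDataToList.1 ≠ pvDiffWitnessOut_converDataToList.2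

-- ===== LEMMAS AND PROOFS =====
-- A's per-occurrence value, as a function of the suffix after the marker occurrence
def pvVal (r : List Char) : List Char :=
  if PySem.Chars.find r ['"'] = -1 then r.dropLast else r.take (PySem.Chars.find r ['"']).toNat

-- A's whole result as a recursion on suffixes
def pvSpec (s : List Char) : List (List Char) :=
  if h : PySem.Chars.isIn pvMarker s = true then
    pvVal (s.drop ((PySem.Chars.find s pvMarker).toNat + pvMarker.length))
      :: pvSpec (s.drop ((PySem.Chars.find s pvMarker).toNat + pvMarker.length))
  else []
termination_by s.length
decreasing_by
  have h15 : 15 ≤ s.length := by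
    have := ((PySem.Chars.isIn_iff_infix pvMarker s).mp h).length_le
    simpa [pvMarker_length] using this
  simp [pvMarker_length]; omega

-- split on the marker, as a recursion on suffixes
def pvSp (s : List Char) : List (List Char) :=
  if h : PySem.Chars.isIn pvMarker s = true then
    s.take (PySem.Chars.find s pvMarker).toNat
      :: pvSp (s.drop ((PySem.Chars.find s pvMarker).toNat + pvMarker.length))
  else [s]
termination_by s.length
decreasing_by
  have h15 : 15 ≤ s.length := by
    have := ((PySem.Chars.isIn_iff_infix pvMarker s).mp h).length_le
    simpa [pvMarker_length] using this
  simp [pvMarker_length]; omega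

-- B's result stream from a suffix after a marker occurrence
def pvStreamB (s : List Char) : List (List Char) :=
  if h : PySem.Chars.isIn pvMarker s = true then
    pvValB (s.take (PySem.Chars.find s pvMarker).toNat)
      :: pvStreamB (s.drop ((PySem.Chars.find s pvMarker).toNat + pvMarker.length))
  else [pvValB s]
termination_by s.length
decreasing_by
  have h15 : 15 ≤ s.length := by
    have := ((PySem.Chars.isIn_iff_infix pvMarker s).mp h).length_le
    simpa [pvMarker_length] using this
  simp [pvMarker_length]; omega

-- the suffixes (after a marker occurrence) on which A's and B's values diverge somewhere
def pvBad (s : List Char) : Prop :=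
  if h : PySem.Chars.isIn pvMarker s = true then
    PySem.Chars.find (s.take (PySem.Chars.find s pvMarker).toNat) ['"'] = -1 ∨
      pvBad (s.drop ((PySem.Chars.find s pvMarker).toNat + pvMarker.length))
  else PySem.Chars.find s ['"'] = -1 ∧ s ≠ []
termination_by s.length
decreasing_by
  have h15 : 15 ≤ s.length := by
    have := ((PySem.Chars.isIn_iff_infix pvMarker s).mp h).length_le
    simpa [pvMarker_length] using this
  simp [pvMarker_length]; omega

theorem pvFindEq (s sub : List Char) (j : Nat) (hp : sub <+: s.drop j)
    (hmin : ∀ i, i < j → ¬ sub <+: s.drop i) : PySem.Chars.find s sub = j := by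
  have hin : PySem.Chars.isIn sub s = true :=
    (PySem.Chars.exists_prefix_drop_iff_isIn sub s).mp ⟨j, hp⟩
  have hnn : 0 ≤ PySem.Chars.find s sub :=
    (PySem.Chars.find_nonneg_iff s sub).mpr ((PySem.Chars.isIn_iff_infix sub s).mp hin)
  obtain ⟨hpre, hm⟩ := PySem.Chars.find_spec hnn
  have : (PySem.Chars.find s sub).toNat = j := by
    by_contra hne
    rcases Nat.lt_or_ge (PySem.Chars.find s sub).toNat j with h | h
    · exact hmin _ h hpre
    · exact hm j (by omega) hp
  omega

theorem pvNoOverlap (txt : List Char) (j i : Nat) (hj : pvMarker <+: txt.drop j)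
    (hi : pvMarker <+: txt.drop i) (h1 : j < i) (h2 : i < j + 15) : False := by
  have hjl : 15 ≤ txt.length - j := by simpa using hj.length_le
  have hil : 15 ≤ txt.length - i := by simpa using hi.length_le
  have hk : i - j < pvMarker.length := by simp [pvMarker]; omega
  have e1 : pvMarker[i - j]'hk = (txt.drop j)[i - j]'(by simp; omega) := hj.getElem hk
  have e2 : pvMarker[0]'(by simp [pvMarker]) = (txt.drop i)[0]'(by simp; omega) := hi.getElem _
  rw [List.getElem_drop] at e1 e2
  have : txt[j + (i - j)]'(by omega) = txt[i + 0]'(by omega) := by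
    congr 1; omega
  have hmm : pvMarker[i - j]'hk = pvMarker[0]'(by simp [pvMarker]) := by
    rw [e1, e2]; exact this
  have hgd : pvMarker.getD (i - j) ' ' = pvMarker.getD 0 ' ' := by
    rw [List.getD_eq_getElem _ _ hk, List.getD_eq_getElem _ _ (by simp [pvMarker])]
    exact hmm
  have hk1 : 1 ≤ i - j := by omega
  have hk2 : i - j < 15 := by omega
  have : ∀ k, k < 15 → 1 ≤ k → pvMarker.getD k ' ' ≠ pvMarker.getD 0 ' ' := by decide
  exact this _ hk2 hk1 hgd

-- a one-character needle sits at the head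
theorem pvSingletonPrefix (a : Char) (m : List Char) : [a] <+: m ↔ m.head? = some a := by
  constructor
  · rintro ⟨t, rfl⟩; rfl
  · cases m with
    | nil => simp
    | cons b bs => intro h; simp at h; subst h; exact ⟨bs, rfl⟩

theorem pvQuoteAt (l : List Char) (i : Nat) : ['"'] <+: l.drop i ↔ l[i]? = some '"' := by
  rw [pvSingletonPrefix, List.head?_drop]

theorem pvOccIn (sub s : List Char) (i : Nat) (h : sub <+: s.drop i) :
    PySem.Chars.isIn sub s = true :=
  (PySem.Chars.exists_prefix_drop_iff_isIn _ _).mp ⟨i, h⟩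

-- find = -1 means the needle character occurs nowhere
theorem pvNoQuoteOfFindNeg (r : List Char) (h : PySem.Chars.find r ['"'] = -1) :
    ∀ k : Nat, r[k]? ≠ some '"' := by
  intro k hk
  have hpre : ['"'] <+: r.drop k := (pvQuoteAt r k).mpr hk
  have hin := pvOccIn _ _ _ hpre
  rw [PySem.Chars.isIn_iff_infix] at hin
  exact (PySem.Chars.find_eq_neg_one_iff r ['"']).mp h hin

-- find on a cons that is not a prefix match
theorem pvSp_cons (c : Char) (rest : List Char) (hnp : ¬ pvMarker <+: (c :: rest)) :
    pvSp (c :: rest) = (pvSp rest).modifyHead (c :: ·) := by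
  by_cases hin : PySem.Chars.isIn pvMarker rest = true
  · have hin' : PySem.Chars.isIn pvMarker (c :: rest) = true := by
      rw [PySem.Chars.isIn_iff_infix] at hin ⊢
      exact List.infix_cons_iff.mpr (Or.inr hin)
    have hnn : 0 ≤ PySem.Chars.find rest pvMarker :=
      (PySem.Chars.find_nonneg_iff rest pvMarker).mpr ((PySem.Chars.isIn_iff_infix _ _).mp hin)
    obtain ⟨hpre, hm⟩ := PySem.Chars.find_spec hnn
    set j := (PySem.Chars.find rest pvMarker).toNat with hjdef
    have hfind : PySem.Chars.find (c :: rest) pvMarker = (j + 1 : Nat) := by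
      apply pvFindEq
      · simpa using hpre
      · intro i hi
        match i with
        | 0 => simpa using hnp
        | (k+1) => simpa using hm k (by omega)
    conv_lhs => rw [pvSp]
    conv_rhs => rw [pvSp]
    simp only [hin, hin', dif_pos, hfind]
    have hdrop : (c :: rest).drop ((((j + 1 : Nat)) : Int).toNat + pvMarker.length)
        = rest.drop (j + pvMarker.length) := by
      simp [pvMarker_length]
    rw [hdrop]
    have htake : (c :: rest).take (((j + 1 : Nat) : Int)).toNat = c :: rest.take j := by
      simp
    rw [htake]
    simp [List.modifyHead]
    exact ⟨rfl, rfl⟩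
  · have hin' : ¬ PySem.Chars.isIn pvMarker (c :: rest) = true := by
      rw [PySem.Chars.isIn_iff_infix] at hin ⊢
      intro h
      rcases List.infix_cons_iff.mp h with h | h
      · exact hnp h
      · exact hin h
    conv_lhs => rw [pvSp]
    conv_rhs => rw [pvSp]
    simp [hin, hin', List.modifyHead]

theorem pvGo (fuel : Nat) (l cur : List Char) (acc : List (List Char)) (hf : l.length < fuel) :
    PySem.Chars.splitOn.go pvMarker fuel l cur acc
      = acc.reverse ++ (pvSp l).modifyHead (cur.reverse ++ ·) := by
  induction fuel generalizing l cur acc with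
  | zero => omega
  | succ fuel ih =>
    match l with
    | [] =>
      have hnil : pvSp [] = [[]] := by rw [pvSp]; rw [dif_neg (by decide)]
      rw [PySem.Chars.splitOn.go, hnil]
      simp [List.modifyHead]
      omega
    | c :: rest =>
      rw [PySem.Chars.splitOn.go]
      by_cases hp : pvMarker.isPrefixOf (c :: rest)
      · rw [if_pos hp]
        have hp' : pvMarker <+: (c :: rest) := List.isPrefixOf_iff_prefix.mp hp
        have hfu : (List.drop pvMarker.length (c :: rest)).length < fuel := by
          simp only [List.length_drop, List.length_cons, pvMarker_length] at hf ⊢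
          omega
        rw [ih _ _ _ hfu]
        have hin' : PySem.Chars.isIn pvMarker (c :: rest) = true :=
          (PySem.Chars.isIn_iff_infix _ _).mpr hp'.isInfix
        have hfind : PySem.Chars.find (c :: rest) pvMarker = (0 : Nat) := by
          apply pvFindEq
          · simpa using hp'
          · omega
        conv_rhs => rw [pvSp]
        rw [dif_pos hin', hfind]
        simp only [Int.toNat_natCast, List.take_zero, List.reverse_cons, List.append_assoc,
          List.singleton_append, List.modifyHead]
        cases hsp : pvSp (List.drop pvMarker.length (c :: rest)) <;> simp [hsp]
      · rw [if_neg hp]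
        have hp' : ¬ pvMarker <+: (c :: rest) := fun h => hp (List.isPrefixOf_iff_prefix.mpr h)
        rw [ih _ _ _ (by simp at hf ⊢; omega)]
        rw [pvSp_cons c rest hp']
        cases h : pvSp rest with
        | nil => simp [List.modifyHead]
        | cons a as => simp [List.modifyHead]

theorem pvSplitOn_eq (s : List Char) : PySem.Chars.splitOn s pvMarker = pvSp s := by
  rw [PySem.Chars.splitOn, pvGo (s.length + 1) s [] [] (by omega)]
  simp
  cases pvSp s <;> simp

-- the last segment, when terminated or empty: B's value equals A's
theorem pvLastGood (s : List Char)
    (h : ¬ PySem.Chars.find s ['"'] = -1 ∨ s = []) : pvValB s = pvVal s := by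
  rcases h with h | rfl
  · have hnn : 0 ≤ PySem.Chars.find s ['"'] := by
      have := PySem.Chars.neg_one_le_find s ['"']
      omega
    rw [pvValB, if_pos (by simp [h]), pvVal, if_neg h, PySem.List.slice_to _ hnn]
  · decide

-- a middle segment containing its closing quote: B's value equals A's value for the suffix
theorem pvMidGood (s : List Char) (hin : PySem.Chars.isIn pvMarker s = true)
    (hq : ¬ PySem.Chars.find (s.take (PySem.Chars.find s pvMarker).toNat) ['"'] = -1) :
    pvValB (s.take (PySem.Chars.find s pvMarker).toNat) = pvVal s := by
  have hnnm : 0 ≤ PySem.Chars.find s pvMarker :=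
    (PySem.Chars.find_nonneg_iff s pvMarker).mpr ((PySem.Chars.isIn_iff_infix _ _).mp hin)
  obtain ⟨hpre, hmin⟩ := PySem.Chars.find_spec hnnm
  set j := (PySem.Chars.find s pvMarker).toNat with hj
  set p := s.take j with hpdef
  have hjlen : j + 15 ≤ s.length := by
    have := hpre.length_le
    simp [pvMarker_length] at this
    omega
  have hnnq : 0 ≤ PySem.Chars.find p ['"'] := by
    have := PySem.Chars.neg_one_le_find p ['"']
    omega
  obtain ⟨hqpre, hqmin⟩ := PySem.Chars.find_spec hnnq
  set q := (PySem.Chars.find p ['"']).toNat with hqdef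
  have hqlt : q < p.length := by
    have := hqpre.length_le
    simp at this
    omega
  have hplen : p.length ≤ j := by simp [hpdef]
  have hfinds : PySem.Chars.find s ['"'] = (q : Int) := by
    apply pvFindEq
    · rw [pvQuoteAt]
      rw [pvQuoteAt] at hqpre
      rw [hpdef, List.getElem?_take_of_lt (by omega)] at hqpre
      exact hqpre
    · intro i hi hcon
      apply hqmin i hi
      rw [pvQuoteAt] at hcon ⊢
      rw [hpdef, List.getElem?_take_of_lt (by omega)]
      exact hcon
  rw [pvValB, if_pos (by simp [hq]), pvVal, if_neg (by rw [hfinds]; omega), hfinds,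
    PySem.List.slice_to _ hnnq]
  rw [(by omega : ((q : Nat) : Int).toNat = q), (by omega : (PySem.Chars.find p ['"']).toNat = q),
    hpdef, List.take_take, Nat.min_eq_left (by omega)]

-- mapping B's loop body over the split equals the stream recursion
theorem pvMapSp (s : List Char) : (pvSp s).map pvValB = pvStreamB s := by
  induction s using pvSp.induct with
  | case1 s hin ih =>
    rw [pvSp, dif_pos hin, List.map_cons, ih]
    conv_rhs => rw [pvStreamB]
    rw [dif_pos hin]
  | case2 s hin =>
    rw [pvSp, dif_neg hin, pvStreamB, dif_neg hin]
    simp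

-- on good suffixes the two streams agree
theorem pvStream_good (s : List Char) (hnb : ¬ pvBad s) :
    pvStreamB s = pvVal s :: pvSpec s := by
  induction s using pvBad.induct with
  | case1 s hin ih =>
    rw [pvBad, dif_pos hin] at hnb
    push_neg at hnb
    obtain ⟨h1, h2⟩ := hnb
    rw [pvStreamB, dif_pos hin, pvMidGood s hin h1, ih h2]
    conv_rhs => rw [pvSpec, dif_pos hin]
  | case2 s hin =>
    rw [pvBad, dif_neg hin] at hnb
    rw [pvStreamB, dif_neg hin, pvSpec, dif_neg hin]
    by_cases hf : PySem.Chars.find s ['"'] = -1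
    · have hse : s = [] := by
        by_contra hne
        exact hnb ⟨hf, hne⟩
      rw [pvLastGood s (Or.inr hse)]
    · rw [pvLastGood s (Or.inl hf)]

-- first-quote characterisations of takeWhile
theorem pvTakeWhileEq (s : List Char) (m : Nat) (hm : s[m]? = some '"')
    (hall : ∀ k, k < m → s[k]? ≠ some '"') : s.takeWhile (· ≠ '"') = s.take m := by
  induction s generalizing m with
  | nil => simp at hm
  | cons c t ih =>
    cases m with
    | zero =>
      simp at hm
      simp [List.takeWhile_cons, hm]
    | succ m =>
      have hc : c ≠ '"' := by
        have := hall 0 (by omega)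
        simpa using this
      simp only [List.takeWhile_cons, List.take_succ_cons]
      rw [if_pos (by simp [hc])]
      rw [ih m (by simpa using hm) (fun k hk => by simpa using hall (k + 1) (by omega))]

theorem pvTakeWhileAll (s : List Char) (hall : ∀ k : Nat, s[k]? ≠ some '"') :
    s.takeWhile (· ≠ '"') = s := by
  induction s with
  | nil => rfl
  | cons c t ih =>
    have hc : c ≠ '"' := by
      have := hall 0
      simpa using this
    simp only [List.takeWhile_cons]
    rw [if_pos (by simp [hc]), ih (fun k => by simpa using hall (k + 1))]

-- a bad suffix after an occurrence at i yields the difference condition on the whole text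
theorem pvBad_to_D (l : List Char) : ∀ (s : List Char), pvBad s →
    ∀ i, pvMarker <+: l.drop i → s = l.drop (i + 15) →
    ∃ t ∈ l.tails, pvMarker <+: t ∧
      (pvMarker.dropLast <:+ (t.drop 15).takeWhile (· ≠ '"') ∨
        ((t.drop 15).takeWhile (· ≠ '"') = t.drop 15 ∧ t.drop 15 ≠ [])) := by
  intro s
  induction s using pvBad.induct with
  | case1 s hin ih =>
    intro hb i hocc hs
    rw [pvBad, dif_pos hin] at hb
    have hnn : 0 ≤ PySem.Chars.find s pvMarker :=
      (PySem.Chars.find_nonneg_iff s pvMarker).mpr ((PySem.Chars.isIn_iff_infix _ _).mp hin)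
    obtain ⟨hpre, hmin⟩ := PySem.Chars.find_spec hnn
    set j := (PySem.Chars.find s pvMarker).toNat with hjdef
    have hjlen : j + 15 ≤ s.length := by
      have := hpre.length_le
      simp [pvMarker_length] at this
      omega
    have hdrop15 : (l.drop i).drop 15 = s := by
      rw [hs, List.drop_drop]
    rcases hb with hq | hb
    · -- the segment before the next occurrence has no quote: its quote-free prefix
      -- runs into the next marker, whose first 14 characters end it
      obtain ⟨tl, ht⟩ := hpre
      have hW : s.takeWhile (· ≠ '"') = s.take (j + 14) := by
        apply pvTakeWhileEq
        · have : (s.drop j)[14]? = some '"' := by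
            rw [← ht]
            rfl
          rw [List.getElem?_drop] at this
          exact this
        · intro k hk hcon
          by_cases hkj : k < j
          · have : s[k]? = (s.take j)[k]? := (List.getElem?_take_of_lt hkj).symm
            rw [this] at hcon
            exact pvNoQuoteOfFindNeg _ hq k hcon
          · have h1 : s[k]? = (s.drop j)[k - j]? := by
              rw [List.getElem?_drop]
              congr 1
              omega
            have h2 : (s.drop j)[k - j]? = pvMarker[k - j]? := by
              rw [← ht, List.getElem?_append_left (by simp [pvMarker_length]; omega)]
            have h3 : ∀ m, m < 14 → pvMarker[m]? ≠ some '"' := by decide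
            exact h3 (k - j) (by omega) (by rw [← h2, ← h1]; exact hcon)
      refine ⟨l.drop i, (List.mem_tails _ _).mpr (List.drop_suffix i l), hocc, Or.inl ?_⟩
      rw [hdrop15, hW, List.take_add]
      have h4 : List.take 14 (List.drop j s) = pvMarker.take 14 := by
        rw [← ht, List.take_append_of_le_length (by simp [pvMarker_length])]
      rw [h4]
      exact ⟨s.take j, by rw [(by decide : pvMarker.dropLast = pvMarker.take 14)]⟩
    · -- recurse on the suffix after the next occurrence
      have hoccj : pvMarker <+: l.drop (i + 15 + j) := by
        have : s.drop j = l.drop (i + 15 + j) := by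
          rw [hs, List.drop_drop]
        rw [← this]
        exact hpre
      have hs' : s.drop (j + pvMarker.length) = l.drop (i + 15 + j + 15) := by
        rw [hs, List.drop_drop, pvMarker_length]
        rfl
      exact ih hb (i + 15 + j) hoccj (by rw [← hs'])
  | case2 s hin =>
    intro hb i hocc hs
    rw [pvBad, dif_neg hin] at hb
    obtain ⟨hq, hne⟩ := hb
    have hdrop15 : (l.drop i).drop 15 = s := by
      rw [hs, List.drop_drop]
    refine ⟨l.drop i, (List.mem_tails _ _).mpr (List.drop_suffix i l), hocc, Or.inr ?_⟩
    rw [hdrop15]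
    exact ⟨pvTakeWhileAll s (fun k => pvNoQuoteOfFindNeg s hq k), hne⟩

theorem pvSliceVal (txt : List Char) (a : Nat) (ha : a ≤ txt.length) :
    PySem.List.slice txt (some ((a : Nat) : Int))
        (some (PySem.Chars.findFrom txt ['"'] ((a : Nat) : Int)))
      = pvVal (txt.drop a) := by
  rw [PySem.Chars.findFrom_natCast txt ['"'] a ha]
  by_cases hq : PySem.Chars.find (txt.drop a) ['"'] = -1
  · rw [if_pos hq, pvVal, if_pos hq]
    have h1 : PySem.List.clampIdx txt.length ((a : Nat) : Int) = a := by
      rw [PySem.List.clampIdx_natCast]; omega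
    simp only [PySem.List.slice, h1, PySem.List.clampIdx_neg_one]
    rw [List.dropLast_eq_take]
    congr 1
    simp
    omega
  · rw [if_neg hq]
    have hnn : 0 ≤ PySem.Chars.find (txt.drop a) ['"'] := by
      have := PySem.Chars.neg_one_le_find (txt.drop a) ['"']
      omega
    rw [PySem.List.slice_toNat txt (by omega) (by omega), pvVal, if_neg hq]
    congr 1
    omega

theorem pvSpec_shift (txt : List Char) (j : Nat) (hj : pvMarker <+: txt.drop j) :
    pvSpec (txt.drop (j + 1)) = pvSpec (txt.drop (j + 15)) := by
  have hdd : ∀ (m k : Nat), (txt.drop m).drop k = txt.drop (m + k) := by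
    intro m k; rw [List.drop_drop]
  by_cases hv : PySem.Chars.isIn pvMarker (txt.drop (j + 15)) = true
  · have hnn : 0 ≤ PySem.Chars.find (txt.drop (j + 15)) pvMarker :=
      (PySem.Chars.find_nonneg_iff _ _).mpr ((PySem.Chars.isIn_iff_infix _ _).mp hv)
    obtain ⟨hpre, hmin⟩ := PySem.Chars.find_spec hnn
    set m := (PySem.Chars.find (txt.drop (j + 15)) pvMarker).toNat with hm
    have hfu : PySem.Chars.find (txt.drop (j + 1)) pvMarker = ((14 + m : Nat) : Int) := by
      apply pvFindEq
      · rw [hdd]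
        rw [hdd] at hpre
        rw [(by omega : j + 1 + (14 + m) = j + 15 + m)]
        exact hpre
      · intro i hi hcon
        rw [hdd] at hcon
        by_cases h14 : i < 14
        · exact pvNoOverlap txt j (j + 1 + i) hj hcon (by omega) (by omega)
        · apply hmin (i - 14) (by omega)
          rw [hdd]
          rw [(by omega : j + 15 + (i - 14) = j + 1 + i)]
          exact hcon
    have hu : PySem.Chars.isIn pvMarker (txt.drop (j + 1)) = true := by
      apply pvOccIn _ _ (14 + m)
      rw [hdd]
      rw [hdd] at hpre
      rw [(by omega : j + 1 + (14 + m) = j + 15 + m)]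
      exact hpre
    conv_lhs => rw [pvSpec]
    conv_rhs => rw [pvSpec]
    rw [dif_pos hu, dif_pos hv, hfu]
    have harg : (txt.drop (j + 1)).drop ((((14 + m : Nat) : Int)).toNat + pvMarker.length)
        = (txt.drop (j + 15)).drop (m + pvMarker.length) := by
      rw [hdd, hdd]
      congr 1
      simp [pvMarker_length]
      omega
    rw [harg]
  · have hu : ¬ PySem.Chars.isIn pvMarker (txt.drop (j + 1)) = true := by
      intro hcon
      obtain ⟨i, hocc⟩ := (PySem.Chars.exists_prefix_drop_iff_isIn pvMarker (txt.drop (j+1))).mpr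
        ((PySem.Chars.isIn_iff_infix _ _).mpr ((PySem.Chars.isIn_iff_infix _ _).mp hcon))
      rw [hdd] at hocc
      by_cases h14 : i < 14
      · exact pvNoOverlap txt j (j + 1 + i) hj hocc (by omega) (by omega)
      · apply hv
        apply pvOccIn _ _ (i - 14)
        rw [hdd]
        rw [(by omega : j + 15 + (i - 14) = j + 1 + i)]
        exact hocc
    rw [pvSpec, dif_neg hu, pvSpec, dif_neg hv]

theorem pvA_eq_spec (txt : List Char) (idx : Nat) (h : idx ≤ txt.length) :
    pvLoopA txt idx h = pvSpec (txt.drop idx) := by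
  induction idx, h using pvLoopA.induct with
  | case1 idx h hf =>
    rw [pvLoopA, dif_pos hf, pvSpec]
    rw [dif_neg]
    intro hin
    rw [PySem.Chars.findFrom_natCast txt pvMarker idx h] at hf
    by_cases hfd : PySem.Chars.find (txt.drop idx) pvMarker = -1
    · rw [PySem.Chars.isIn_iff_infix] at hin
      exact (PySem.Chars.find_eq_neg_one_iff _ _).mp hfd hin
    · have hnn : 0 ≤ PySem.Chars.find (txt.drop idx) pvMarker := by
        have := PySem.Chars.neg_one_le_find (txt.drop idx) pvMarker
        omega
      rw [if_neg hfd] at hf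
      omega
  | case2 idx h hf ih =>
    have hb := pvFound_bounds txt idx h hf
    have hfn := PySem.Chars.findFrom_natCast txt pvMarker idx h
    have hfd : ¬ PySem.Chars.find (txt.drop idx) pvMarker = -1 := by
      intro hc; rw [hfn, if_pos hc] at hf; exact hf rfl
    have hnn : 0 ≤ PySem.Chars.find (txt.drop idx) pvMarker := by
      have := PySem.Chars.neg_one_le_find (txt.drop idx) pvMarker
      omega
    have hocc : pvMarker <+: txt.drop ((PySem.Chars.findFrom txt pvMarker (idx : Int)).toNat) :=
      (PySem.Chars.findFrom_natCast_spec txt pvMarker idx h hf).2.1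
    rw [pvLoopA, dif_neg hf]
    have hin : PySem.Chars.isIn pvMarker (txt.drop idx) = true := by
      rw [PySem.Chars.isIn_iff_infix]
      exact (PySem.Chars.find_ne_neg_one_iff _ _).mp hfd
    conv_rhs => rw [pvSpec]
    rw [dif_pos hin]
    have hj : (PySem.Chars.findFrom txt pvMarker (idx : Int)).toNat
        = idx + (PySem.Chars.find (txt.drop idx) pvMarker).toNat := by
      rw [hfn, if_neg hfd]
      omega
    have hdd : (txt.drop idx).drop ((PySem.Chars.find (txt.drop idx) pvMarker).toNat + pvMarker.length)
        = txt.drop ((PySem.Chars.findFrom txt pvMarker (idx : Int)).toNat + 15) := by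
      rw [List.drop_drop]
      congr 1
      simp [pvMarker_length]
      omega
    rw [hdd]
    congr 1
    · rw [(by simp [pvMarker_length] : ((PySem.Chars.findFrom txt pvMarker (idx : Int)).toNat + pvMarker.length : Nat)
          = ((PySem.Chars.findFrom txt pvMarker (idx : Int)).toNat + 15 : Nat))]
      exact pvSliceVal txt _ (by omega)
    · rw [ih, pvSpec_shift txt ((PySem.Chars.findFrom txt pvMarker (idx : Int)).toNat) hocc]

-- ===== VERDICT (by name: the statement is the Claim_ definition above) =====
theorem converDataToList_spec : Claim_unchanged_converDataToList := by
  intro txt _ hD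
  unfold converDataToList converDataToList_alt
  rw [pvA_eq_spec, pvSplitOn_eq]
  rw [List.drop_zero]
  by_cases hin : PySem.Chars.isIn pvMarker txt.toList = true
  · have hnn : 0 ≤ PySem.Chars.find txt.toList pvMarker :=
      (PySem.Chars.find_nonneg_iff _ _).mpr ((PySem.Chars.isIn_iff_infix _ _).mp hin)
    obtain ⟨hpre, -⟩ := PySem.Chars.find_spec hnn
    have hnb : ¬ pvBad (txt.toList.drop
        ((PySem.Chars.find txt.toList pvMarker).toNat + pvMarker.length)) := by
      intro hb
      apply hD
      unfold D_converDataToList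
      exact pvBad_to_D txt.toList _ hb _ hpre (by rw [pvMarker_length])
    rw [pvSpec, dif_pos hin, pvSp, dif_pos hin, List.tail_cons]
    have := pvMapSp (txt.toList.drop ((PySem.Chars.find txt.toList pvMarker).toNat + pvMarker.length))
    rw [pvStream_good _ hnb] at this
    calc _ = ((pvSp _).map pvValB).map (fun l => String.ofList l) := by
            rw [this]
      _ = _ := by rw [List.map_map]; rfl
  · rw [pvSpec, dif_neg hin, pvSp, dif_neg hin]
    simp

theorem converDataToList_changed : Claim_changed_converDataToList := by
  unfold Claim_changed_converDataToList
  refine ⟨by decide, by decide, ?_, by decide, by decide⟩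
  show converDataToList pvDiffWitness_converDataToList = pvDiffWitnessOut_converDataToList.1
  unfold converDataToList pvDiffWitness_converDataToList pvDiffWitnessOut_converDataToList
  rw [pvLoopA, dif_neg (by decide)]
  rw [pvLoopA, dif_pos (by decide)]
  decide
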